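-- pv_equiv track=rewrite | github.com/soprue/algorithm | Baekjoon/17140.py | r_operation
-- ===== SOURCE A (Python) =====
-- def r_operation(arr):
--     new_arr = []
--     max_length = 0
--
--     for row in arr:
--         count = {}
--         for num in row:
--             if num != 0:
--                 count[num] = count.get(num, 0) + 1
--
--         # 등장 횟수와 숫자를 기준으로 정렬
--         sorted_row = sorted(count.items(), key=lambda x: (x[1], x[0]))
--
--         # 정렬된 결과에 대해 숫자와 등장 횟수를 차례대로 추가
--         new_row = []
--         for num, freq in sorted_row:
--             new_row += [num, freq]
--
--         max_length = max(max_length, len(new_row))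
--         new_arr.append(new_row)
--
--     # 모든 행이 같은 길이를 가지도록 0으로 채움
--     for row in new_arr:
--         row.extend([0] * (max_length - len(row)))
--
--     return new_arr
-- ===== SOURCE B (Python) =====
-- def _runs(s):
--     # run-length encode a sorted list: maximal blocks of equal values -> (value, count)
--     if not s:
--         return []
--     v = s[0]
--     n = 1
--     while n < len(s) and s[n] == v:
--         n += 1
--     return [(v, n)] + _runs(s[n:])
--
--
-- def r_operation(arr):
--     rows = []
--     for row in arr:
--         s = sorted(x for x in row if x != 0)
--         pairs = sorted(_runs(s), key=lambda p: (p[1], p[0]))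
--         rows.append([v for p in pairs for v in p])
--     m = max(map(len, rows), default=0)
--     return [r + [0] * (m - len(r)) for r in rows]
-- ===== Notes on version B (the rewrite author's own statement) =====
-- stated objective: alternative
-- what changed: Per-row frequency counting by dict updates is replaced by sort-then-run-length-group (recursive grouping of consecutive equal values in the sorted nonzero values), and the append-and-track-max loop with in-place zero padding is replaced by a map, a max with default, and a padding comprehension.
import Mathlib
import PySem

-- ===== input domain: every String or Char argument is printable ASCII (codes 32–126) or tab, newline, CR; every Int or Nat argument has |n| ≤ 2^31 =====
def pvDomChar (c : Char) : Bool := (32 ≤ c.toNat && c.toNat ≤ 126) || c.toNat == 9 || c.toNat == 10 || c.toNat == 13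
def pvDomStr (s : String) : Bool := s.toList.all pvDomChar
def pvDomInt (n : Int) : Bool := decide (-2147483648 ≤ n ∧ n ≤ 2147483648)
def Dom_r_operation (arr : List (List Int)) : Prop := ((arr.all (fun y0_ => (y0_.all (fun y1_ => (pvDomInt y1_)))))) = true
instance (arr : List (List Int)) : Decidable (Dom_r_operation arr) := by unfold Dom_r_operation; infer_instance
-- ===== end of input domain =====

-- B replaces per-row dict counting by sort-then-run-length grouping, and the append/track-max
-- outer loop plus in-place zero padding by map + max-with-default + a padding map
-- (A extends its freshly built rows in place; the equivalence proved is about the return value).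


-- ===== PORT A =====
def r_operation (arr : List (List Int)) : List (List Int) :=
  -- the outer loop carries (new_arr, max_length)
  let st := arr.foldl (fun (acc : List (List Int) × Int) row =>
    let count := row.foldl (fun d num =>
      if num ≠ 0 then d.insert num (d.getD num 0 + 1) else d) (PySem.Dict.empty)
    let sorted_row := PySem.List.sorted2 count.items (fun x => x.2) (fun x => x.1)
    let new_row := sorted_row.foldl (fun nr p => nr ++ [p.1, p.2]) ([] : List Int)
    (acc.1 ++ [new_row], max acc.2 (new_row.length : Int))) ([], 0)
  -- 'row.extend([0] * (max_length - len(row)))' mutates each row; the return value is this map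
  st.1.map (fun row => row ++ PySem.List.pyRepeat [0] (st.2 - (row.length : Int)))

-- ===== PORT B =====
-- _runs: 'n = 1 + matching prefix of the tail' is 1 + |takeWhile (== v)|, 's[n:]' is dropWhile
def pyRuns : List Int → List (Int × Int)
  | [] => []
  | v :: t => (v, 1 + ((t.takeWhile (· == v)).length : Int)) ::
      pyRuns (t.dropWhile (· == v))
termination_by s => s.length
decreasing_by simp only [List.length_cons]; exact Nat.lt_succ_of_le (List.length_dropWhile_le _ _)

def r_operation_alt (arr : List (List Int)) : List (List Int) :=
  let rows := arr.map (fun row =>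
    let s := PySem.List.sorted (row.filter (fun x => x ≠ 0)) (fun x => x)
    let pairs := PySem.List.sorted2 (pyRuns s) (fun p => p.2) (fun p => p.1)
    pairs.flatMap (fun p => [p.1, p.2]))
  let m := PySem.List.maxD (rows.map (fun r => (r.length : Int))) (fun x => x) 0
  rows.map (fun r => r ++ PySem.List.pyRepeat [0] (m - (r.length : Int)))

-- ===== PRECONDITION & SPEC =====
def Spec_r_operation (arr : List (List Int)) (out : List (List Int)) : Prop := out = r_operation_alt arr
instance (arr : List (List Int)) (out : List (List Int)) : Decidable (Spec_r_operation arr out) := by unfold Spec_r_operation; infer_instance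

-- ===== CLAIM (what is proved, stated in full; the proofs are below) =====
def Claim_equal_r_operation : Prop := ∀ (arr : List (List Int)), Dom_r_operation arr → Spec_r_operation arr (r_operation arr)

-- ===== LEMMAS AND PROOFS =====

theorem dropWhile_gt {v : Int} {t : List Int} (hp : t.Pairwise (· ≤ ·)) (hv : ∀ x ∈ t, v ≤ x) :
    ∀ x ∈ t.dropWhile (· == v), v < x := by
  induction t with
  | nil => simp
  | cons a t' ih =>
    rw [List.dropWhile_cons]
    by_cases h : a = v
    · simp only [h, BEq.rfl, if_true]
      exact ih hp.of_cons (fun x hx => hv x (List.mem_cons_of_mem _ hx))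
    · have hva : v < a := lt_of_le_of_ne (hv a (by simp)) (Ne.symm h)
      simp only [beq_iff_eq, h, if_false]
      intro x hx
      rcases List.mem_cons.mp hx with rfl | hx'
      · exact hva
      · exact lt_of_lt_of_le hva ((List.pairwise_cons.mp hp).1 x hx')

-- membership characterisation of pyRuns on a sorted list
theorem pyRuns_mem (s : List Int) : s.Pairwise (· ≤ ·) → ∀ p : Int × Int,
    (p ∈ pyRuns s ↔ p.1 ∈ s ∧ p.2 = (s.count p.1 : Int)) := by
  induction s using pyRuns.induct with
  | case1 => intro _ p; simp [pyRuns]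
  | case2 v t ih =>
    intro hs p
    have hpt : t.Pairwise (· ≤ ·) := hs.of_cons
    have hv : ∀ x ∈ t, v ≤ x := (List.pairwise_cons.mp hs).1
    have hgt : ∀ x ∈ t.dropWhile (· == v), v < x := dropWhile_gt hpt hv
    have ht2p : (t.dropWhile (· == v)).Pairwise (· ≤ ·) :=
      hpt.sublist (List.dropWhile_sublist _)
    have hsplit : t.takeWhile (· == v) ++ t.dropWhile (· == v) = t :=
      List.takeWhile_append_dropWhile
    have h1 : (t.takeWhile (· == v)).count v = (t.takeWhile (· == v)).length := by
      rw [List.count_eq_length]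
      intro b hb
      have hbv : (b == v) = true := List.mem_takeWhile_imp (p := fun x => x == v) hb
      simp_all
    have h2 : (t.dropWhile (· == v)).count v = 0 :=
      List.count_eq_zero.mpr (fun h => lt_irrefl v (hgt v h))
    have hcv : (v :: t).count v = (t.takeWhile (· == v)).length + 1 := by
      rw [List.count_cons_self]
      conv_lhs => rw [← hsplit]
      rw [List.count_append, h1, h2]
    rw [pyRuns]
    rw [List.mem_cons, ih ht2p p]
    by_cases hp : p.1 = v
    · have hpt2 : p.1 ∉ t.dropWhile (· == v) := fun h => lt_irrefl v (hp ▸ hgt _ h)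
      constructor
      · rintro (rfl | ⟨h3, h4⟩)
        · exact ⟨by simp, by simp [hcv]; omega⟩
        · exact absurd h3 hpt2
      · rintro ⟨h3, h4⟩
        left
        have : p.2 = 1 + ((t.takeWhile (· == v)).length : Int) := by
          rw [h4, hp, hcv]; push_cast; omega
        calc p = (p.1, p.2) := rfl
          _ = (v, 1 + ((t.takeWhile (· == v)).length : Int)) := by rw [hp, this]
    · have ht1 : (t.takeWhile (· == v)).count p.1 = 0 :=
        List.count_eq_zero.mpr (fun h => hp (beq_iff_eq.mp (List.mem_takeWhile_imp (p := fun x => x == v) h)))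
      have hc : (v :: t).count p.1 = (t.dropWhile (· == v)).count p.1 := by
        have hstep : List.count p.1 (v :: t) = List.count p.1 t := by
          simp [List.count_cons]
          exact fun e => hp e.symm
        rw [hstep]
        conv_lhs => rw [← hsplit]
        rw [List.count_append, ht1]; omega
      have hm : p.1 ∈ t ↔ p.1 ∈ t.dropWhile (· == v) := by
        conv_lhs => rw [← hsplit]
        rw [List.mem_append]
        constructor
        · rintro (h | h)
          · exact absurd (beq_iff_eq.mp (List.mem_takeWhile_imp (p := fun x => x == v) h)) hp
          · exact h
        · exact Or.inr
      constructor
      · rintro (rfl | ⟨h3, h4⟩)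
        · exact absurd rfl hp
        · exact ⟨List.mem_cons_of_mem _ (hm.mpr h3), by rw [h4, hc]⟩
      · rintro ⟨h3, h4⟩
        rcases List.mem_cons.mp h3 with h5 | h5
        · exact absurd h5 hp
        · exact Or.inr ⟨hm.mp h5, by rw [h4, hc]⟩

-- run values strictly increase
theorem pyRuns_keys_lt (s : List Int) : s.Pairwise (· ≤ ·) →
    (pyRuns s).Pairwise (fun p q => p.1 < q.1) := by
  induction s using pyRuns.induct with
  | case1 => intro _; simp [pyRuns]
  | case2 v t ih =>
    intro hs
    have hpt : t.Pairwise (· ≤ ·) := hs.of_cons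
    have hv : ∀ x ∈ t, v ≤ x := (List.pairwise_cons.mp hs).1
    have hgt := dropWhile_gt hpt hv
    have ht2p : (t.dropWhile (· == v)).Pairwise (· ≤ ·) :=
      hpt.sublist (List.dropWhile_sublist _)
    rw [pyRuns, List.pairwise_cons]
    refine ⟨fun q hq => ?_, ih ht2p⟩
    exact hgt q.1 ((pyRuns_mem _ ht2p q).mp hq).1

-- the runs of the sorted nonzero values are, up to order, Counter(...).items()
theorem pyRuns_perm (fs : List Int) :
    (pyRuns (PySem.List.sorted fs (fun x => x))).Perm
      ((PySem.Set.ofList fs).map (fun k => (k, (fs.count k : Int)))) := by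
  have hperm : (PySem.List.sorted fs (fun x => x)).Perm fs := PySem.List.sorted_perm _ _ _
  have hs : (PySem.List.sorted fs (fun x => x)).Pairwise (· ≤ ·) := by
    have := PySem.List.sorted_pairwise fs (fun x => x)
    simpa using this
  have hn1 : (pyRuns (PySem.List.sorted fs (fun x => x))).Nodup :=
    List.Pairwise.imp (fun h => by intro e; rw [e] at h; exact lt_irrefl _ h)
      (pyRuns_keys_lt _ hs)
  have hn2 : ((PySem.Set.ofList fs).map (fun k => (k, (fs.count k : Int)))).Nodup :=
    (PySem.Set.nodup_ofList fs).map (fun a b h => congrArg Prod.fst h)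
  rw [List.perm_ext_iff_of_nodup hn1 hn2]
  intro q
  rw [pyRuns_mem _ hs q, List.mem_map]
  constructor
  · rintro ⟨h1, h2⟩
    refine ⟨q.1, (PySem.Set.mem_ofList _ _).mpr (hperm.mem_iff.mp h1), ?_⟩
    have : fs.count q.1 = (PySem.List.sorted fs (fun x => x)).count q.1 := (hperm.count_eq _).symm
    calc (q.1, (fs.count q.1 : Int)) = (q.1, q.2) := by rw [h2, this]
      _ = q := rfl
  · rintro ⟨k, hk, rfl⟩
    have hk' : k ∈ fs := (PySem.Set.mem_ofList _ _).mp hk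
    exact ⟨hperm.mem_iff.mpr hk', by rw [hperm.count_eq]⟩

-- Python's tuple key (p[1], p[0]) is the lexicographic key toLex (p.2, p.1)
theorem sorted2_eq_sorted_lex (xs : List (Int × Int)) :
    PySem.List.sorted2 xs (fun p => p.2) (fun p => p.1)
      = PySem.List.sorted xs (fun p => toLex (p.2, p.1)) := by
  unfold PySem.List.sorted2 PySem.List.sorted
  simp only [if_neg (by decide : ¬ (false = true))]
  congr 1
  funext acc a
  congr 1
  funext x y
  show (decide (x.2 < y.2) || !decide (y.2 < x.2) && decide (x.1 < y.1))
      = decide (toLex (x.2, x.1) < toLex (y.2, y.1))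
  by_cases h1 : x.2 < y.2 <;> by_cases h2 : y.2 < x.2 <;> by_cases h3 : x.1 < y.1 <;>
    simp [Prod.Lex.lt_iff, h1, h2, h3] <;> omega

-- the key is injective, so sorting by it is permutation-invariant
theorem sorted2_eq_of_perm (xs ys : List (Int × Int)) (h : xs.Perm ys) :
    PySem.List.sorted2 xs (fun p => p.2) (fun p => p.1)
      = PySem.List.sorted2 ys (fun p => p.2) (fun p => p.1) := by
  rw [sorted2_eq_sorted_lex, sorted2_eq_sorted_lex]
  refine PySem.List.sorted_eq_sorted_of_perm _ _ _ ?_ h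
  intro p q hpq
  have h2 : ((p.2, p.1) : Int × Int) = (q.2, q.1) := toLex.injective hpq
  obtain ⟨h3, h4⟩ := Prod.mk.injEq .. ▸ h2
  exact Prod.ext h4 h3

-- the per-row result of A equals the per-row result of B
theorem row_eq (row : List Int) :
    (PySem.List.sorted2
        (row.foldl (fun d num => if num ≠ 0 then d.insert num (d.getD num 0 + 1) else d)
          (PySem.Dict.empty)).items (fun x => x.2) (fun x => x.1)).foldl
        (fun nr p => nr ++ [p.1, p.2]) ([] : List Int)
      = (PySem.List.sorted2
          (pyRuns (PySem.List.sorted (row.filter (fun x => x ≠ 0)) (fun x => x)))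
          (fun p => p.2) (fun p => p.1)).flatMap (fun p => [p.1, p.2]) := by
  rw [PySem.List.foldl_append_eq_flatMap (g := fun p : Int × Int => [p.1, p.2])]
  rw [List.nil_append]
  congr 1
  have hdict : row.foldl (fun d num => if num ≠ 0 then d.insert num (d.getD num 0 + 1) else d)
      PySem.Dict.empty = PySem.Dict.counter (row.filter (fun x => decide (x ≠ 0))) := by
    rw [PySem.List.foldl_ite_eq_foldl_filter (p := fun num : Int => num ≠ 0)
      (f := fun (d : PySem.Dict Int Int) num => d.insert num (d.getD num 0 + 1))]
    exact PySem.Dict.foldl_insert_getD_add_one_eq_counter _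
  rw [hdict, PySem.Dict.items_counter]
  exact sorted2_eq_of_perm _ _ (pyRuns_perm _).symm

-- a running max of nonnegative ints starting at 0 is max(..., default=0)
theorem maxfold (l : List Int) (h : ∀ x ∈ l, 0 ≤ x) :
    l.foldl max 0 = PySem.List.maxD l (fun x => x) 0 := by
  cases l with
  | nil => rfl
  | cons x t =>
    have hx : max 0 x = x := max_eq_right (h x (by simp))
    simp [PySem.List.maxD, PySem.List.max?_id_cons, List.foldl_cons, hx]

-- ===== VERDICT (by name: the statement is the Claim_ definition above) =====
theorem r_operation_spec : Claim_equal_r_operation := by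
  intro arr _
  unfold Spec_r_operation r_operation r_operation_alt
  simp only []
  rw [PySem.List.foldl_prod_mk
    (f := fun (l : List (List Int)) (row : List Int) => l ++
      [(PySem.List.sorted2
        (row.foldl (fun (d : PySem.Dict Int Int) num => if num ≠ 0 then d.insert num (d.getD num 0 + 1) else d)
          (PySem.Dict.empty)).items (fun x => x.2) (fun x => x.1)).foldl
        (fun nr p => nr ++ [p.1, p.2]) ([] : List Int)])
    (g := fun (m : Int) (row : List Int) => max m
      (((PySem.List.sorted2
        (row.foldl (fun (d : PySem.Dict Int Int) num => if num ≠ 0 then d.insert num (d.getD num 0 + 1) else d)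
          (PySem.Dict.empty)).items (fun x => x.2) (fun x => x.1)).foldl
        (fun nr p => nr ++ [p.1, p.2]) ([] : List Int)).length : Int))]
  simp only [row_eq]
  rw [PySem.List.foldl_append_singleton_eq_map, List.nil_append]
  have hmax : arr.foldl (fun (m : Int) row => max m
      (((PySem.List.sorted2
          (pyRuns (PySem.List.sorted (row.filter (fun x => x ≠ 0)) (fun x => x)))
          (fun p => p.2) (fun p => p.1)).flatMap (fun p => [p.1, p.2])).length : Int)) 0
      = PySem.List.maxD ((arr.map (fun row =>
          (PySem.List.sorted2
            (pyRuns (PySem.List.sorted (row.filter (fun x => x ≠ 0)) (fun x => x)))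
            (fun p => p.2) (fun p => p.1)).flatMap (fun p => [p.1, p.2]))).map
          (fun r => (r.length : Int))) (fun x => x) 0 := by
    rw [← maxfold]
    · rw [List.foldl_map, List.foldl_map]
    · intro x hx
      rcases List.mem_map.mp hx with ⟨r, _, rfl⟩
      exact Int.natCast_nonneg _
  rw [hmax]
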